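-- pv_equiv track=rewrite | github.com/shahuldxb/trade | Python/Cure/mt799_generator_fixed.py | _sanitize_reference
-- ===== SOURCE A (Python) =====
-- def _sanitize_reference(value: str, default_value: str) -> str:
--     """Ensure MT799 reference fields comply with network rules."""
--     ref = (value or "").strip().replace(" ", "")
--     if not ref:
--         ref = default_value
--     ref = ref.strip("/")
--     while "//" in ref:
--         ref = ref.replace("//", "/")
--     if not ref:
--         ref = default_value
--     return ref[:16]
-- ===== SOURCE B (Python) =====
-- def _sanitize_reference(value: str, default_value: str) -> str:
--     """Ensure MT799 reference fields comply with network rules (single-scan variant)."""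
--     ref = (value or "").strip().replace(" ", "")
--     if not ref:
--         ref = default_value
--     # One left-to-right scan: drop leading/trailing slashes and collapse any
--     # run of slashes to a single one, instead of strip('/') plus a replace loop.
--     out = []
--     sep = False
--     for ch in ref:
--         if ch == "/":
--             sep = True
--         else:
--             if sep and out:
--                 out.append("/")
--             sep = False
--             out.append(ch)
--     ref = "".join(out)
--     if not ref:
--         ref = default_value
--     return ref[:16]
-- ===== Notes on version B (the rewrite author's own statement) =====
-- stated objective: alternative
-- what changed: Replaces A's strip('/') plus the repeated global replace('//','/') fixpoint loop with a single left-to-right character scan (pending-separator flag) that drops leading/trailing slashes and collapses slash runs in one pass; similar size, one pass instead of rescanning.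
import Mathlib
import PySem

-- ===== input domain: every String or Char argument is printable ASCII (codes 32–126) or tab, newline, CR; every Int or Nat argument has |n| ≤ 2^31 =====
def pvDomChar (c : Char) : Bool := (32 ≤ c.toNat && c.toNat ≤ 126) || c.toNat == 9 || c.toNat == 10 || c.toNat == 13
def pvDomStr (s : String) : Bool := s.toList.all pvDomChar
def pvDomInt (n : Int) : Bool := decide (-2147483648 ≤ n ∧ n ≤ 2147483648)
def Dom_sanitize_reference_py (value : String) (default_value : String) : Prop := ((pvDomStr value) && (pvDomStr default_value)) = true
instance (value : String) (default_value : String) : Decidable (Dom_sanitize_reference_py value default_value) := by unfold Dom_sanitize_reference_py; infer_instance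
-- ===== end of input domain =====

-- B replaces A's strip('/') + repeated replace("//","/") loop by one left-to-right scan
-- that drops leading/trailing slashes and collapses slash runs (objective: alternative one-pass).

-- ===== PORT A =====
-- One pass of Python's ref.replace("//", "/"): left-to-right, non-overlapping.
-- (proof/termination helper for the while-loop below; cited by pvCollapse's decreasing_by)
def pvRep1 : List Char → List Char
  | [] => []
  | [c] => [c]
  | c :: d :: t => if c = '/' ∧ d = '/' then '/' :: pvRep1 t else c :: pvRep1 (d :: t)

theorem pvRep1_len_le : ∀ l : List Char, (pvRep1 l).length ≤ l.length
  | [] => by simp [pvRep1]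
  | [c] => by simp [pvRep1]
  | c :: d :: t => by
    have h1 := pvRep1_len_le t
    have h2 := pvRep1_len_le (d :: t)
    simp only [pvRep1]
    split_ifs <;> simp_all <;> omega

theorem pvRep1_len_lt : ∀ l : List Char, ['/', '/'] <:+: l → (pvRep1 l).length < l.length
  | [], h => by simp at h
  | [c], h => by
    rcases h with ⟨s, t, hst⟩
    rcases s <;> rcases t <;> simp_all
  | c :: d :: t, h => by
    by_cases hcd : c = '/' ∧ d = '/'
    · have := pvRep1_len_le t
      simp only [pvRep1, if_pos hcd]
      simp; omega
    · have ht : ['/', '/'] <:+: d :: t := by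
        rcases List.infix_cons_iff.1 h with hp | hi
        · rcases List.cons_prefix_cons.1 hp with ⟨hc, hp2⟩
          rcases List.cons_prefix_cons.1 hp2 with ⟨hd, _⟩
          exact absurd ⟨hc.symm, hd.symm⟩ hcd
        · exact hi
      have := pvRep1_len_lt (d :: t) ht
      simp only [pvRep1, if_neg hcd]
      simp at *; omega

theorem pvReplaceGo_eq : ∀ (fuel : Nat) (l acc : List Char), l.length ≤ fuel →
    PySem.Chars.replace.go ['/', '/'] ['/'] fuel l acc = acc.reverse ++ pvRep1 l := by
  intro fuel
  induction fuel with
  | zero =>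
    intro l acc h
    have hl : l = [] := by cases l <;> simp_all
    subst hl
    simp [PySem.Chars.replace.go, pvRep1]
  | succ n ih =>
    intro l acc h
    match l with
    | [] => simp [PySem.Chars.replace.go, pvRep1]
    | [c] =>
      have hpre : (['/', '/'] : List Char).isPrefixOf [c] = false := by
        simp [List.isPrefixOf]
      rw [PySem.Chars.replace.go]
      simp only [hpre, Bool.false_eq_true, if_false]
      rw [ih [] (c :: acc) (by simp)]
      simp [pvRep1]
    | c :: d :: t =>
      by_cases hcd : c = '/' ∧ d = '/'
      · obtain ⟨hc, hd⟩ := hcd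
        subst hc; subst hd
        rw [PySem.Chars.replace.go]
        have hpre : (['/', '/'] : List Char).isPrefixOf ('/' :: '/' :: t) = true := by
          simp [List.isPrefixOf]
        simp only [hpre, if_true]
        rw [show (['/', '/'] : List Char).length = 2 from rfl]
        rw [show List.drop 2 ('/' :: '/' :: t) = t from rfl]
        rw [ih t (['/'].reverse ++ acc) (by simp at h ⊢; omega)]
        simp [pvRep1]
      · rw [PySem.Chars.replace.go]
        have hpre : (['/', '/'] : List Char).isPrefixOf (c :: d :: t) = false := by
          simp [List.isPrefixOf]
          intro hc hd
          exact hcd ⟨hc.symm, hd.symm⟩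
        simp only [hpre, Bool.false_eq_true, if_false]
        rw [ih (d :: t) (c :: acc) (by simp at h ⊢; omega)]
        simp [pvRep1, if_neg hcd]

theorem pvReplace_eq (l : List Char) : PySem.Chars.replace l ['/', '/'] ['/'] = pvRep1 l := by
  rw [PySem.Chars.replace]
  simp only [List.isEmpty_cons, Bool.false_eq_true, if_false]
  rw [pvReplaceGo_eq l.length l [] le_rfl]
  simp

-- the Python 'while "//" in ref: ref = ref.replace("//", "/")' loop ("//".toList = ['/','/'])
def pvCollapse (r : List Char) : List Char :=
  if PySem.Chars.isIn ['/', '/'] r then pvCollapse (PySem.Chars.replace r ['/', '/'] ['/']) else r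
termination_by r.length
decreasing_by
  rw [pvReplace_eq]
  exact pvRep1_len_lt r ((PySem.Chars.isIn_iff_infix _ _).1 (by assumption))

def sanitize_reference_py (value : String) (default_value : String) : String :=
  -- (value or "") = value for a str argument
  let ref0 := PySem.Str.replace (PySem.Str.strip value) " " ""
  let ref1 := if ref0 = "" then default_value else ref0
  let ref2 := PySem.Str.stripChars ref1 "/"
  let ref3 := String.ofList (pvCollapse ref2.toList)
  let ref4 := if ref3 = "" then default_value else ref3
  PySem.Str.slice ref4 none (some 16)

-- ===== PORT B =====
def sanitize_reference_py_alt (value : String) (default_value : String) : String :=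
  let ref0 := PySem.Str.replace (PySem.Str.strip value) " " ""
  let ref1 := if ref0 = "" then default_value else ref0
  -- single scan; the Python list 'out' of characters is the List Char st.1, ''.join is String.ofList
  let st := ref1.toList.foldl
    (fun (st : List Char × Bool) ch =>
      if ch = '/' then (st.1, true)
      else ((if st.2 = true ∧ st.1 ≠ [] then st.1 ++ ['/'] else st.1) ++ [ch], false))
    ([], false)
  let ref2 := String.ofList st.1
  let ref3 := if ref2 = "" then default_value else ref2
  PySem.Str.slice ref3 none (some 16)

-- ===== PRECONDITION & SPEC =====
def Spec_sanitize_reference_py (value : String) (default_value : String) (out : String) : Prop := out = sanitize_reference_py_alt value default_value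
instance (value : String) (default_value : String) (out : String) : Decidable (Spec_sanitize_reference_py value default_value out) := by unfold Spec_sanitize_reference_py; infer_instance

-- ===== CLAIM (what is proved, stated in full; the proofs are below) =====
def Claim_equal_sanitize_reference_py : Prop := ∀ (value : String) (default_value : String), Dom_sanitize_reference_py value default_value → Spec_sanitize_reference_py value default_value (sanitize_reference_py value default_value)

-- ===== LEMMAS AND PROOFS =====

-- the slash predicate used by stripChars "/"
def pvP (c : Char) : Bool := c == '/'

-- collapse runs of '/' (the fixpoint of pvRep1)
def pvSq : List Char → List Char
  | [] => []
  | [c] => [c]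
  | c :: d :: t => if c = '/' ∧ d = '/' then pvSq (d :: t) else c :: pvSq (d :: t)

-- text appended after a nonempty buffer with pending separator flag, in B's scan
def pvT : Bool → List Char → List Char
  | _, [] => []
  | sep, c :: t => if c = '/' then pvT true t else (if sep then ['/'] else []) ++ c :: pvT false t

-- B's scan from the empty buffer
def pvG : List Char → List Char
  | [] => []
  | c :: t => if c = '/' then pvG t else c :: pvT false t

-- drop trailing slashes
def pvRstrip : List Char → List Char
  | [] => []
  | c :: t => let r := pvRstrip t; if r = [] then (if c = '/' then [] else [c]) else c :: r

theorem pv_sq_cons_ne (c : Char) (u : List Char) (h : c ≠ '/') : pvSq (c :: u) = c :: pvSq u := by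
  cases u with
  | nil => simp [pvSq]
  | cons d t =>
    simp only [pvSq]
    rw [if_neg (fun hcd => h hcd.1)]

theorem pvS1 : ∀ t : List Char, pvSq ('/' :: t) = '/' :: pvSq (List.dropWhile pvP t)
  | [] => by simp [pvSq, List.dropWhile]
  | c :: t => by
    by_cases hc : c = '/'
    · subst hc
      rw [show pvSq ('/' :: '/' :: t) = pvSq ('/' :: t) from by simp [pvSq]]
      rw [pvS1 t]
      rw [show List.dropWhile pvP ('/' :: t) = List.dropWhile pvP t from by simp [List.dropWhile, pvP, beq_iff_eq]]
    · rw [show pvSq ('/' :: c :: t) = '/' :: pvSq (c :: t) from by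
        simp only [pvSq]; rw [if_neg (fun h => hc h.2)]]
      rw [show List.dropWhile pvP (c :: t) = c :: t from by simp [List.dropWhile, pvP, beq_iff_eq, beq_eq_false_iff_ne.mpr hc]]

theorem pvD : ∀ t : List Char, List.dropWhile pvP (pvRep1 t) = pvRep1 (List.dropWhile pvP t)
  | [] => by simp [pvRep1]
  | [c] => by
    by_cases hc : c = '/'
    · simp [pvRep1, List.dropWhile, pvP, hc]
    · simp [pvRep1, List.dropWhile, pvP, beq_eq_false_iff_ne.mpr hc]
  | c :: d :: t => by
    by_cases hcd : c = '/' ∧ d = '/'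
    · obtain ⟨hc, hd⟩ := hcd; subst hc; subst hd
      rw [show pvRep1 ('/' :: '/' :: t) = '/' :: pvRep1 t from by simp [pvRep1]]
      rw [show List.dropWhile pvP ('/' :: pvRep1 t) = List.dropWhile pvP (pvRep1 t) from by
        simp [List.dropWhile, pvP, beq_iff_eq]]
      rw [pvD t]
      rw [show List.dropWhile pvP ('/' :: '/' :: t) = List.dropWhile pvP t from by
        simp [List.dropWhile, pvP, beq_iff_eq]]
    · rw [show pvRep1 (c :: d :: t) = c :: pvRep1 (d :: t) from by simp [pvRep1, if_neg hcd]]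
      by_cases hc : c = '/'
      · subst hc
        have hd : d ≠ '/' := fun hd => hcd ⟨rfl, hd⟩
        rw [show List.dropWhile pvP ('/' :: pvRep1 (d :: t)) = List.dropWhile pvP (pvRep1 (d :: t)) from by
          simp [List.dropWhile, pvP, beq_iff_eq]]
        rw [pvD (d :: t)]
        rw [show List.dropWhile pvP ('/' :: d :: t) = d :: t from by simp [List.dropWhile, pvP, beq_iff_eq, beq_eq_false_iff_ne.mpr hd]]
        rw [show List.dropWhile pvP (d :: t) = d :: t from by simp [List.dropWhile, pvP, beq_iff_eq, beq_eq_false_iff_ne.mpr hd]]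
      · rw [show List.dropWhile pvP (c :: pvRep1 (d :: t)) = c :: pvRep1 (d :: t) from by
          simp [List.dropWhile, pvP, beq_iff_eq, beq_eq_false_iff_ne.mpr hc]]
        rw [show List.dropWhile pvP (c :: d :: t) = c :: d :: t from by simp [List.dropWhile, pvP, beq_iff_eq, beq_eq_false_iff_ne.mpr hc]]
        rw [show pvRep1 (c :: d :: t) = c :: pvRep1 (d :: t) from by simp [pvRep1, if_neg hcd]]

theorem pvL2 : ∀ l : List Char, pvSq (pvRep1 l) = pvSq l
  | [] => by simp [pvRep1]
  | [c] => by simp [pvRep1]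
  | c :: d :: t => by
    by_cases hcd : c = '/' ∧ d = '/'
    · obtain ⟨hc, hd⟩ := hcd; subst hc; subst hd
      rw [show pvRep1 ('/' :: '/' :: t) = '/' :: pvRep1 t from by simp [pvRep1]]
      rw [pvS1 (pvRep1 t), pvD t]
      have : (List.dropWhile pvP t).length < t.length + 1 + 1 :=
        Nat.lt_of_le_of_lt (Nat.le_of_lt_succ (Nat.lt_succ_of_le (List.length_dropWhile_le pvP t))) (by omega)
      rw [pvL2 (List.dropWhile pvP t)]
      rw [show pvSq ('/' :: '/' :: t) = pvSq ('/' :: t) from by simp [pvSq]]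
      rw [pvS1 t]
    · rw [show pvRep1 (c :: d :: t) = c :: pvRep1 (d :: t) from by simp [pvRep1, if_neg hcd]]
      by_cases hc : c = '/'
      · subst hc
        have hd : d ≠ '/' := fun hd => hcd ⟨rfl, hd⟩
        rw [pvS1 (pvRep1 (d :: t)), pvD (d :: t)]
        rw [show List.dropWhile pvP (d :: t) = d :: t from by simp [List.dropWhile, pvP, beq_iff_eq, beq_eq_false_iff_ne.mpr hd]]
        rw [pvL2 (d :: t)]
        rw [pvS1 (d :: t)]
        rw [show List.dropWhile pvP (d :: t) = d :: t from by simp [List.dropWhile, pvP, beq_iff_eq, beq_eq_false_iff_ne.mpr hd]]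
      · rw [pv_sq_cons_ne c _ hc, pvL2 (d :: t), pv_sq_cons_ne c _ hc]
termination_by l => l.length
decreasing_by all_goals simp [List.length_dropWhile_le]; try omega


theorem pvL1 : ∀ l : List Char, ¬ (['/', '/'] <:+: l) → pvSq l = l
  | [], _ => by simp [pvSq]
  | [c], _ => by simp [pvSq]
  | c :: d :: t, h => by
    by_cases hcd : c = '/' ∧ d = '/'
    · exact absurd ⟨[], t, by simp [hcd.1, hcd.2]⟩ h
    · rw [show pvSq (c :: d :: t) = c :: pvSq (d :: t) from by simp [pvSq, if_neg hcd]]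
      rw [pvL1 (d :: t) (fun hi => h (hi.trans (List.suffix_cons c (d :: t)).isInfix))]

theorem pvCollapse_eq_sq : ∀ l : List Char, pvCollapse l = pvSq l
  | l => by
    by_cases h : PySem.Chars.isIn ['/', '/'] l = true
    · rw [pvCollapse, if_pos h, pvReplace_eq]
      have hlt : (pvRep1 l).length < l.length :=
        pvRep1_len_lt l ((PySem.Chars.isIn_iff_infix _ _).1 h)
      rw [pvCollapse_eq_sq (pvRep1 l)]
      exact pvL2 l
    · rw [pvCollapse, if_neg h]
      exact (pvL1 l (fun hi => h ((PySem.Chars.isIn_iff_infix _ _).2 hi))).symm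
termination_by l => l.length
decreasing_by assumption

theorem pvRstrip_eq : ∀ l : List Char, (List.dropWhile pvP l.reverse).reverse = pvRstrip l
  | [] => by simp [pvRstrip]
  | c :: t => by
    have ih := pvRstrip_eq t
    rw [List.reverse_cons, List.dropWhile_append]
    by_cases ht : pvRstrip t = []
    · have he : (List.dropWhile pvP t.reverse).isEmpty = true := by
        rw [List.isEmpty_iff]
        rw [← ih] at ht
        simpa using ht
      rw [if_pos he]
      by_cases hc : c = '/'
      · simp [List.dropWhile, pvP, hc, pvRstrip, ht]
      · simp [List.dropWhile, pvP, beq_eq_false_iff_ne.mpr hc, pvRstrip, ht, hc]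
    · have he : ¬ (List.dropWhile pvP t.reverse).isEmpty = true := by
        rw [List.isEmpty_iff]
        rw [← ih] at ht
        simpa using ht
      rw [if_neg he, List.reverse_append, ih]
      simp [pvRstrip, ht]

theorem pvN : ∀ (t : List Char) (sep : Bool),
    pvSq (if sep = true ∧ pvRstrip t ≠ [] then '/' :: pvRstrip t else pvRstrip t) = pvT sep t
  | [], sep => by simp [pvRstrip, pvT, pvSq]
  | c :: t, sep => by
    by_cases hc : c = '/'
    · subst hc
      rw [show pvT sep ('/' :: t) = pvT true t from by simp [pvT]]
      rw [← pvN t true]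
      by_cases hr : pvRstrip t = []
      · simp [pvRstrip, hr]
      · have h1 : pvRstrip ('/' :: t) = '/' :: pvRstrip t := by simp [pvRstrip, hr]
        rw [h1]
        have hsq : pvSq ('/' :: '/' :: pvRstrip t) = pvSq ('/' :: pvRstrip t) := by simp [pvSq]
        rcases sep <;> simp [hr, hsq]
    · have h1 : pvRstrip (c :: t) = c :: pvRstrip t := by
        by_cases hr : pvRstrip t = [] <;> simp [pvRstrip, hr, hc]
      rw [show pvT sep (c :: t) = (if sep = true then ['/'] else []) ++ c :: pvT false t from by
        simp [pvT, hc]]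
      rw [h1, ← pvN t false]
      have hsqc := pv_sq_cons_ne c (pvRstrip t) hc
      have hsq2 : pvSq ('/' :: c :: pvRstrip t) = '/' :: pvSq (c :: pvRstrip t) := by
        simp only [pvSq]
        rw [if_neg (fun h => hc h.2)]
      rcases sep
      · simp [hsqc]
      · simp [hsq2, hsqc]

theorem pvContains_eq : (fun c => (['/'] : List Char).contains c) = pvP := by
  funext c
  simp only [List.contains_cons, List.contains_nil, Bool.or_false, pvP]

theorem pvStripChars_eq (l : List Char) :
    PySem.Chars.stripChars l ['/'] = (List.dropWhile pvP (List.dropWhile pvP l).reverse).reverse := by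
  simp only [PySem.Chars.stripChars, pvContains_eq]

theorem pvStrip_sq : ∀ l : List Char, pvSq (PySem.Chars.stripChars l ['/']) = pvG l
  | [] => by simp [pvStripChars_eq, pvSq, pvG]
  | c :: t => by
    rw [pvStripChars_eq]
    by_cases hc : c = '/'
    · subst hc
      rw [show List.dropWhile pvP ('/' :: t) = List.dropWhile pvP t from by
        simp [List.dropWhile, pvP]]
      rw [← pvStripChars_eq, pvStrip_sq t]
      simp [pvG]
    · rw [show List.dropWhile pvP (c :: t) = c :: t from by
        simp [List.dropWhile, pvP, beq_eq_false_iff_ne.mpr hc]]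
      rw [pvRstrip_eq (c :: t)]
      have h1 : pvRstrip (c :: t) = c :: pvRstrip t := by
        by_cases hr : pvRstrip t = [] <;> simp [pvRstrip, hr, hc]
      rw [h1, pv_sq_cons_ne c _ hc]
      have hn := pvN t false
      simp only [Bool.false_eq_true, false_and, if_false] at hn
      rw [hn]
      simp [pvG, hc]

-- B's fold, characterised
def pvStep (st : List Char × Bool) (ch : Char) : List Char × Bool :=
  if ch = '/' then (st.1, true)
  else ((if st.2 = true ∧ st.1 ≠ [] then st.1 ++ ['/'] else st.1) ++ [ch], false)

theorem pvFold_ne : ∀ (l : List Char) (out : List Char) (sep : Bool), out ≠ [] →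
    (l.foldl pvStep (out, sep)).1 = out ++ pvT sep l
  | [], out, sep, _ => by simp [pvT]
  | c :: l, out, sep, h => by
    rw [List.foldl_cons]
    by_cases hc : c = '/'
    · rw [show pvStep (out, sep) c = (out, true) from by simp [pvStep, hc]]
      rw [pvFold_ne l out true h]
      simp [pvT, hc]
    · rw [show pvStep (out, sep) c =
          ((if sep = true ∧ out ≠ [] then out ++ ['/'] else out) ++ [c], false) from by
        simp [pvStep, hc]]
      rw [pvFold_ne l _ false (by simp)]
      rw [show pvT sep (c :: l) = (if sep = true then ['/'] else []) ++ c :: pvT false l from by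
        simp [pvT, hc]]
      rcases sep <;> simp [h]

theorem pvFold_nil : ∀ (l : List Char) (sep : Bool), (l.foldl pvStep ([], sep)).1 = pvG l
  | [], sep => by simp [pvG]
  | c :: l, sep => by
    rw [List.foldl_cons]
    by_cases hc : c = '/'
    · rw [show pvStep ([], sep) c = ([], true) from by simp [pvStep, hc]]
      rw [pvFold_nil l true]
      simp [pvG, hc]
    · rw [show pvStep ([], sep) c = ([c], false) from by simp [pvStep, hc]]
      rw [pvFold_ne l [c] false (by simp)]
      simp [pvG, hc]

theorem pvMain (l : List Char) :
    pvCollapse (PySem.Chars.stripChars l ['/']) = (l.foldl pvStep ([], false)).1 := by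
  rw [pvCollapse_eq_sq, pvStrip_sq, pvFold_nil]

theorem pvTail (r1 d : String) :
    (let ref2 := PySem.Str.stripChars r1 "/"
     let ref3 := String.ofList (pvCollapse ref2.toList)
     let ref4 := if ref3 = "" then d else ref3
     PySem.Str.slice ref4 none (some 16)) =
    (let st := r1.toList.foldl
        (fun (st : List Char × Bool) ch =>
          if ch = '/' then (st.1, true)
          else ((if st.2 = true ∧ st.1 ≠ [] then st.1 ++ ['/'] else st.1) ++ [ch], false))
        ([], false)
     let ref2 := String.ofList st.1
     let ref3 := if ref2 = "" then d else ref2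
     PySem.Str.slice ref3 none (some 16)) := by
  have hstep : (fun (st : List Char × Bool) ch =>
      if ch = '/' then (st.1, true)
      else ((if st.2 = true ∧ st.1 ≠ [] then st.1 ++ ['/'] else st.1) ++ [ch], false)) = pvStep := rfl
  have hlist : (PySem.Str.stripChars r1 "/").toList = PySem.Chars.stripChars r1.toList ['/'] := by
    rw [PySem.Str.toList_stripChars]
    rfl
  simp only [hstep, hlist, pvMain r1.toList]

-- ===== VERDICT (by name: the statement is the Claim_ definition above) =====
theorem sanitize_reference_py_spec : Claim_equal_sanitize_reference_py := by
  intro value default_value _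
  show sanitize_reference_py value default_value = sanitize_reference_py_alt value default_value
  unfold sanitize_reference_py sanitize_reference_py_alt
  exact pvTail _ _
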